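-- pv_equiv track=rewrite | github.com/lx827/CNN | tests/diagnosis/evaluation/main.py | _limit_files
-- ===== SOURCE A (Python) =====
-- def _limit_files(files, max_per_class=5):
--     """限制每个类别的文件数量，加快评价速度"""
--     from collections import defaultdict
--     class_files = defaultdict(list)
--     for f, info in files:
--         lbl = info.get("label", "unknown")
--         class_files[lbl].append((f, info))
--     result = []
--     for lbl in sorted(class_files.keys()):
--         result.extend(class_files[lbl][:max_per_class])
--     return result
-- ===== SOURCE B (Python) =====
-- def _limit_files(files, max_per_class=5):
--     """Same result as A: sorted label set + one filtering scan per label (no dict of buckets)."""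
--     labels = sorted({info.get("label", "unknown") for _f, info in files})
--     result = []
--     for lbl in labels:
--         result.extend([p for p in files if p[1].get("label", "unknown") == lbl][:max_per_class])
--     return result
-- ===== Notes on version B (the rewrite author's own statement) =====
-- stated objective: simpler
-- what changed: replaces the defaultdict bucketing pass with a sorted set of labels followed by one filtering scan of the input per label (no dict of buckets is built or kept)
import Mathlib
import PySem

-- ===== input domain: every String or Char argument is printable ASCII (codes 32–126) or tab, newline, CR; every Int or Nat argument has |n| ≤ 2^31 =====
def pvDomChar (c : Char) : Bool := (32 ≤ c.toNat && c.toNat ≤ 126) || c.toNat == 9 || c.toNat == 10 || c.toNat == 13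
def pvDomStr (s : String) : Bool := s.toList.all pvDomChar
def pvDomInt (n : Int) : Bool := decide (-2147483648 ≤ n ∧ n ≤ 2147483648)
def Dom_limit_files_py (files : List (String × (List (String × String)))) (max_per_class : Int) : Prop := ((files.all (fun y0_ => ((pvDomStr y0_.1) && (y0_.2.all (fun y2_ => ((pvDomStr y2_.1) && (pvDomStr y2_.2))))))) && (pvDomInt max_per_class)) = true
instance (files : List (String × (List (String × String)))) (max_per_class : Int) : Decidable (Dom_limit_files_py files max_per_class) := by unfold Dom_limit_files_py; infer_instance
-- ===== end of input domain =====

-- B replaces A's defaultdict bucketing with a sorted label set plus one filtering scan per label;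
-- objective: simpler (no dict of buckets), not faster.

-- ===== PORT A =====
-- info.get("label", "unknown")  (shared by both ports, both Pythons call it)
def pvLabel (info : List (String × String)) : String :=
  (PySem.Dict.mk info).getD "label" "unknown"

def limit_files_py (files : List (String × (List (String × String)))) (max_per_class : Int) : List (String × (List (String × String))) :=
  -- class_files = defaultdict(list); for f, info in files: class_files[lbl].append((f, info))
  let class_files : PySem.Dict String (List (String × (List (String × String)))) :=
    files.foldl (fun d p => d.modify (pvLabel p.2) [] (fun cur => cur ++ [p])) PySem.Dict.empty
  -- for lbl in sorted(class_files.keys()): result.extend(class_files[lbl][:max_per_class])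
  (PySem.List.sorted class_files.keys (fun x => x) false).foldl
    (fun result lbl => result ++ PySem.List.slice (class_files.getD lbl []) none (some max_per_class)) []

-- ===== PORT B =====
def limit_files_py_alt (files : List (String × (List (String × String)))) (max_per_class : Int) : List (String × (List (String × String))) :=
  -- labels = sorted({info.get("label", "unknown") for _f, info in files})
  let labels := PySem.List.sorted (PySem.Set.ofList (files.map (fun p => pvLabel p.2))) (fun x => x) false
  -- for lbl in labels: result.extend([p for p in files if p[1].get(...) == lbl][:max_per_class])
  labels.foldl
    (fun result lbl => result ++ PySem.List.slice (files.filter (fun p => pvLabel p.2 == lbl)) none (some max_per_class)) []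

-- ===== PRECONDITION & SPEC =====
def Spec_limit_files_py (files : List (String × (List (String × String)))) (max_per_class : Int) (out : List (String × (List (String × String)))) : Prop := out = limit_files_py_alt files max_per_class
instance (files : List (String × (List (String × String)))) (max_per_class : Int) (out : List (String × (List (String × String)))) : Decidable (Spec_limit_files_py files max_per_class out) := by unfold Spec_limit_files_py; infer_instance

-- ===== CLAIM (what is proved, stated in full; the proofs are below) =====
def Claim_equal_limit_files_py : Prop := ∀ (files : List (String × (List (String × String)))) (max_per_class : Int), Dom_limit_files_py files max_per_class → Spec_limit_files_py files max_per_class (limit_files_py files max_per_class)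

-- ===== LEMMAS AND PROOFS =====

-- the bucket for label c collects, in order, exactly the files whose label is c
theorem pvBucket_getD (l : List (String × (List (String × String))))
    (d : PySem.Dict String (List (String × (List (String × String))))) (c : String) :
    (l.foldl (fun d p => d.modify (pvLabel p.2) [] (fun cur => cur ++ [p])) d).getD c []
      = d.getD c [] ++ l.filter (fun p => pvLabel p.2 == c) := by
  induction l generalizing d with
  | nil => simp
  | cons x xs ih =>
    simp only [List.foldl_cons, List.filter_cons, ih, PySem.Dict.getD_modify, beq_iff_eq]
    by_cases h : pvLabel x.2 = c
    · simp [h]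
    · rw [if_neg (fun hc : c = pvLabel x.2 => h hc.symm), if_neg h]

-- the dict's key list is exactly the set of labels in first-occurrence order
theorem pvBucket_keys (l : List (String × (List (String × String)))) :
    (l.foldl (fun d p => d.modify (pvLabel p.2) [] (fun cur => cur ++ [p]))
        (PySem.Dict.empty : PySem.Dict String (List (String × (List (String × String)))))).keys
      = PySem.Set.ofList (l.map (fun p => pvLabel p.2)) := by
  have h := PySem.Dict.keys_foldl_modify_key l (fun p => pvLabel p.2) []
      (fun _ p => fun cur => cur ++ [p]) PySem.Dict.empty
  simpa [PySem.Dict.keys_empty, PySem.Set.update, PySem.Set.ofList_eq_foldl] using h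

-- ===== VERDICT (by name: the statement is the Claim_ definition above) =====
theorem limit_files_py_spec : Claim_equal_limit_files_py := by
  intro files max_per_class _
  unfold Spec_limit_files_py limit_files_py limit_files_py_alt
  simp only [pvBucket_keys, pvBucket_getD, PySem.Dict.getD_empty, List.nil_append]
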